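-- pv_equiv track=rewrite | github.com/miwasuke/slackbot | main.py | return_result
-- ===== SOURCE A (Python) =====
-- def return_result(words,questions):
--     result = dict()
--     keys = []
--
--     for w in words:
--         for q in questions.values():
--             if w in q:
--                 keys = [k for k, v in questions.items() if v == q]
--                 for k in keys:
--                     result.setdefault(k,q)
--     return result
-- ===== SOURCE B (Python) =====
-- def return_result(words, questions):
--     groups = {}
--     for k, v in questions.items():
--         groups.setdefault(v, []).append(k)
--     result = {}
--     for w in words:
--         for v, ks in groups.items():
--             if w in v:
--                 for k in ks:
--                     result.setdefault(k, v)
--     return result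
-- ===== Notes on version B (the rewrite author's own statement) =====
-- stated objective: faster
-- what changed: B groups the question keys by value once (value -> keys index) and then iterates words x distinct values, instead of A's re-scanning all items to rebuild the key list for every (word, value) match.
import Mathlib
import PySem

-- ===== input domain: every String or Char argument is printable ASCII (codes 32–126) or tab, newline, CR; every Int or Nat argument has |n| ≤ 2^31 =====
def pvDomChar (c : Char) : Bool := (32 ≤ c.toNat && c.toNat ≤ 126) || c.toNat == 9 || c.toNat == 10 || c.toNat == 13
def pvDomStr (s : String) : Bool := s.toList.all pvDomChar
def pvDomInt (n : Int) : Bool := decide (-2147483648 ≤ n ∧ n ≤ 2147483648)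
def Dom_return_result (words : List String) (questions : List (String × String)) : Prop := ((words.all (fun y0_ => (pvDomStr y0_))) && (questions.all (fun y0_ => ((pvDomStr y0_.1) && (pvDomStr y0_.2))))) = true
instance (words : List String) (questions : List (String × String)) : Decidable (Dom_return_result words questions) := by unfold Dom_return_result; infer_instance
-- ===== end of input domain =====

-- B replaces A's per-(word,value) rescan of all items with a value→keys index built once, then iterates words × distinct values.

-- ===== PORT A =====
-- literal port of A: for w in words: for q in questions.values(): if w in q:
--   keys = [k for k,v in questions.items() if v == q]; for k in keys: result.setdefault(k, q)
def return_result (words : List String) (questions : List (String × String)) : List (String × String) :=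
  (words.foldl (fun result w =>
    (questions.map (·.2)).foldl (fun result q =>
      if PySem.Str.isIn w q then
        ((questions.filter (fun p => p.2 == q)).map (·.1)).foldl
          (fun r k => r.setdefault k q) result
      else result) result)
    (PySem.Dict.empty : PySem.Dict String String)).items

-- ===== PORT B =====
-- literal port of Source B: groups[v] is the list of keys with value v (first-occurrence order of values),
-- then for w in words: for (v, ks) in groups.items(): if w in v: setdefault each k.
def return_result_alt (words : List String) (questions : List (String × String)) : List (String × String) :=
  let groups : PySem.Dict String (List String) :=
    questions.foldl (fun g p => g.modify p.2 [] (· ++ [p.1])) PySem.Dict.empty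
  (words.foldl (fun result w =>
    groups.items.foldl (fun result p =>
      if PySem.Str.isIn w p.1 then
        p.2.foldl (fun r k => r.setdefault k p.1) result
      else result) result)
    (PySem.Dict.empty : PySem.Dict String String)).items

-- ===== PRECONDITION & SPEC =====
def Spec_return_result (words : List String) (questions : List (String × String)) (out : List (String × String)) : Prop := out = return_result_alt words questions
instance (words : List String) (questions : List (String × String)) (out : List (String × String)) : Decidable (Spec_return_result words questions out) := by unfold Spec_return_result; infer_instance

-- ===== CLAIM (what is proved, stated in full; the proofs are below) =====
def Claim_equal_return_result : Prop := ∀ (words : List String) (questions : List (String × String)), Dom_return_result words questions → Spec_return_result words questions (return_result words questions)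

-- ===== LEMMAS AND PROOFS =====

-- keys of `questions` whose value is q, in order (A's comprehension, B's groups[q])
def qkeys (questions : List (String × String)) (q : String) : List String :=
  (questions.filter (fun p => p.2 == q)).map (·.1)

-- A's/B's inner body for one word w and one value q
def stepQ (questions : List (String × String)) (w : String)
    (result : PySem.Dict String String) (q : String) : PySem.Dict String String :=
  if PySem.Str.isIn w q then
    (qkeys questions q).foldl (fun r k => r.setdefault k q) result
  else result

-- a setdefault loop never removes keys
theorem sd_mono (ks : List String) (v : String) (res : PySem.Dict String String)
    (k : String) (h : res.contains k = true) :
    (ks.foldl (fun r k' => r.setdefault k' v) res).contains k = true := by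
  induction ks generalizing res with
  | nil => exact h
  | cons a t ih =>
    simp only [List.foldl_cons]
    exact ih _ (by simp [PySem.Dict.contains_setdefault, h])

-- after the setdefault loop every key of ks is present
theorem sd_covers (ks : List String) (v : String) (res : PySem.Dict String String)
    (k : String) (h : k ∈ ks) :
    (ks.foldl (fun r k' => r.setdefault k' v) res).contains k = true := by
  induction ks generalizing res with
  | nil => cases h
  | cons a t ih =>
    simp only [List.foldl_cons]
    rcases List.mem_cons.mp h with rfl | hk
    · exact sd_mono _ _ _ _ (by simp [PySem.Dict.contains_setdefault])
    · exact ih _ hk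

-- a setdefault loop over keys that are all present is a no-op
theorem sd_id (ks : List String) (v : String) (res : PySem.Dict String String)
    (h : ∀ k ∈ ks, res.contains k = true) :
    ks.foldl (fun r k' => r.setdefault k' v) res = res := by
  induction ks generalizing res with
  | nil => rfl
  | cons a t ih =>
    have ha : res.setdefault a v = res := by
      apply PySem.Dict.setdefault_of_contains
      exact h a (by simp)
    simp only [List.foldl_cons, ha]
    exact ih _ (fun k hk => h k (List.mem_cons_of_mem a hk))

-- "value q is already fully handled in res"
def Cov (questions : List (String × String)) (w q : String)
    (res : PySem.Dict String String) : Prop :=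
  PySem.Str.isIn w q = true → ∀ k ∈ qkeys questions q, res.contains k = true

theorem cov_step (questions : List (String × String)) (w q : String)
    (res : PySem.Dict String String) :
    Cov questions w q (stepQ questions w res q) := by
  intro hg k hk
  unfold stepQ
  rw [if_pos hg]
  exact sd_covers _ _ _ _ hk

theorem cov_mono (questions : List (String × String)) (w q q' : String)
    (res : PySem.Dict String String) (h : Cov questions w q res) :
    Cov questions w q (stepQ questions w res q') := by
  intro hg k hk
  unfold stepQ
  split
  · exact sd_mono _ _ _ _ (h hg k hk)
  · exact h hg k hk

theorem step_of_cov (questions : List (String × String)) (w q : String)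
    (res : PySem.Dict String String) (h : Cov questions w q res) :
    stepQ questions w res q = res := by
  unfold stepQ
  split
  · exact sd_id _ _ _ (h (by assumption))
  · rfl

-- core: folding stepQ over a list equals folding it over its new-element dedup,
-- relative to a set of values already covered in res
theorem fold_dedup_gen (questions : List (String × String)) (w : String) :
    ∀ (L seen : List String) (res : PySem.Dict String String),
      (∀ q ∈ seen, Cov questions w q res) →
      ∃ t, PySem.Set.update seen L = seen ++ t ∧
        L.foldl (stepQ questions w) res = t.foldl (stepQ questions w) res := by
  intro L
  induction L with
  | nil => exact fun seen res _ => ⟨[], by simp [PySem.Set.update], rfl⟩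
  | cons q L' ih =>
    intro seen res hseen
    by_cases hq : PySem.Set.contains seen q = true
    · have hmem : q ∈ seen := List.mem_of_elem_eq_true hq
      have hcov : Cov questions w q res := hseen q hmem
      have hstep : stepQ questions w res q = res := step_of_cov _ _ _ _ hcov
      have hadd : PySem.Set.add seen q = seen := by
        simp [PySem.Set.add, hmem]
      obtain ⟨t, ht1, ht2⟩ := ih seen res hseen
      refine ⟨t, ?_, ?_⟩
      · simpa [PySem.Set.update, hadd] using ht1
      · simpa [hstep] using ht2
    · have hnmem : q ∉ seen := fun hm => hq (List.elem_eq_true_of_mem hm)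
      have hadd : PySem.Set.add seen q = seen ++ [q] := by
        simp [PySem.Set.add, hnmem]
      have hseen' : ∀ p ∈ seen ++ [q], Cov questions w p (stepQ questions w res q) := by
        intro p hp
        rcases List.mem_append.mp hp with hp | hp
        · exact cov_mono _ _ _ _ _ (hseen p hp)
        · simp only [List.mem_singleton] at hp
          subst hp
          exact cov_step _ _ _ _
      obtain ⟨t, ht1, ht2⟩ := ih (seen ++ [q]) (stepQ questions w res q) hseen'
      refine ⟨q :: t, ?_, ?_⟩
      · simp only [PySem.Set.update, List.foldl_cons] at *
        rw [hadd, ht1]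
        simp
      · simpa using ht2

theorem fold_eq_fold_dedup (questions : List (String × String)) (w : String)
    (L : List String) (res : PySem.Dict String String) :
    L.foldl (stepQ questions w) res = (PySem.List.dedup L).foldl (stepQ questions w) res := by
  obtain ⟨t, ht1, ht2⟩ := fold_dedup_gen questions w L [] res (by simp)
  have : PySem.List.dedup L = t := by
    have := ht1
    simpa [PySem.List.dedup_eq_ofList, PySem.Set.ofList_eq_foldl, PySem.Set.update] using this
  rw [this]
  exact ht2

-- B's groups dict characterised
theorem groups_items (questions : List (String × String)) :
    (questions.foldl (fun g p => g.modify p.2 [] (· ++ [p.1]))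
        (PySem.Dict.empty : PySem.Dict String (List String))).items
      = (PySem.List.dedup (questions.map (·.2))).map
          (fun v => (v, qkeys questions v)) := by
  set g := questions.foldl (fun g p => g.modify p.2 [] (· ++ [p.1]))
      (PySem.Dict.empty : PySem.Dict String (List String)) with hg
  have hswap : g = (questions.map Prod.swap).foldl
      (fun d p => d.modify p.1 [] (· ++ [p.2])) PySem.Dict.empty := by
    rw [hg, List.foldl_map]
    rfl
  have hkeys : g.keys = PySem.List.dedup (questions.map (·.2)) := by
    rw [hg, PySem.Dict.keys_foldl_modify_key]
    simp [PySem.List.dedup_eq_ofList, PySem.Set.update, PySem.Set.ofList_eq_foldl,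
      PySem.Dict.keys_empty]
  have hnd : g.keys.Nodup := by
    rw [hg]
    exact PySem.Dict.nodup_keys_foldl_modify_key _ _ _ _ _
      (by simp [PySem.Dict.keys_empty])
  have hgetD : ∀ v, g.getD v [] = qkeys questions v := by
    intro v
    rw [hswap, PySem.Dict.getD_foldl_modify_append]
    simp [qkeys, PySem.Dict.getD_empty, List.filter_map, List.map_map,
      Function.comp_def, Prod.swap]
  rw [PySem.Dict.items_eq_map_keys g hnd []]
  rw [hkeys]
  exact List.map_congr_left (fun v _ => by rw [hgetD v])

theorem return_result_eq (words : List String) (questions : List (String × String)) :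
    return_result words questions = return_result_alt words questions := by
  unfold return_result return_result_alt
  congr 1
  rw [groups_items questions]
  apply PySem.List.foldl_congr_mem
  intro result w _
  conv_rhs => rw [List.foldl_map]
  exact fold_eq_fold_dedup questions w (questions.map (·.2)) result

-- ===== VERDICT (by name: the statement is the Claim_ definition above) =====
theorem return_result_spec : Claim_equal_return_result := by
  intro words questions _
  exact return_result_eq words questions
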